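-- pv_equiv track=rewrite | github.com/sigma-py/orthopy | test/test_e1r2_probabilist.py | _integrate_all_monomials
-- ===== SOURCE A (Python) =====
-- def _integrate_all_monomials(max_k):
--     out = []
--     for k in range(max_k + 1):
--         if k == 0:
--             out.append(1)
--         elif k == 1:
--             out.append(0)
--         else:
--             out.append(out[k - 2] * (k - 1))
--     return out
-- ===== SOURCE B (Python) =====
-- def _integrate_all_monomials(max_k):
--     def odd_prod_below(k):
--         p = 1
--         for j in range(1, k):
--             if j % 2 == 1:
--                 p *= j
--         return p
--     return [0 if k % 2 == 1 else odd_prod_below(k) for k in range(max_k + 1)]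
-- ===== Notes on version B (the rewrite author's own statement) =====
-- stated objective: alternative
-- what changed: Each list entry is computed independently in closed form (0 for odd k, product of the odd numbers below k for even k) instead of reading back out[k-2] in a linear DP recurrence.
import Mathlib
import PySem

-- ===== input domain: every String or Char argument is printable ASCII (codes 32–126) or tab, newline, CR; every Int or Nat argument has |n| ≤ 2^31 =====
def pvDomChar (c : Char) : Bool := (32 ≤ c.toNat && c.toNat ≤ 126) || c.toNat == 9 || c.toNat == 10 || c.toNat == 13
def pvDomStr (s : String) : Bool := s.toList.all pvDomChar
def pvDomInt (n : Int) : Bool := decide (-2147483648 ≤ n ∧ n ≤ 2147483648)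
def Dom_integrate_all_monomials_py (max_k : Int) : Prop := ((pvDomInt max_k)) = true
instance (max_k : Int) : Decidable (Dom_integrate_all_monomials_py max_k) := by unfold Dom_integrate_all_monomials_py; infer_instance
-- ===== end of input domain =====

-- B computes each entry independently in closed form (0 for odd k, product of odd numbers below k for even k) instead of A's out[k-2] recurrence; objective: alternative decomposition, not faster.


-- ===== PORT A =====
-- out.append(x) → out ++ [x]; out[k-2] is always in range here (0 ≤ k-2 < len out),
-- so pyGetD with default 0 is exact.
def integrate_all_monomials_py (max_k : Int) : List Int :=
  (PySem.List.pyRange 0 (max_k + 1) 1).foldl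
    (fun out k =>
      if k == 0 then out ++ [1]
      else if k == 1 then out ++ [0]
      else out ++ [PySem.List.pyGetD out (k - 2) 0 * (k - 1)]) []

-- ===== PORT B =====
def oddProdBelow (k : Int) : Int :=
  (PySem.List.pyRange 1 k 1).foldl (fun p j => if PySem.Int.mod j 2 == 1 then p * j else p) 1

def integrate_all_monomials_py_alt (max_k : Int) : List Int :=
  (PySem.List.pyRange 0 (max_k + 1) 1).map
    (fun k => if PySem.Int.mod k 2 == 1 then 0 else oddProdBelow k)

-- ===== PRECONDITION & SPEC =====
def Spec_integrate_all_monomials_py (max_k : Int) (out : List Int) : Prop := out = integrate_all_monomials_py_alt max_k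
instance (max_k : Int) (out : List Int) : Decidable (Spec_integrate_all_monomials_py max_k out) := by unfold Spec_integrate_all_monomials_py; infer_instance

-- ===== CLAIM (what is proved, stated in full; the proofs are below) =====
def Claim_equal_integrate_all_monomials_py : Prop := ∀ (max_k : Int), Dom_integrate_all_monomials_py max_k → Spec_integrate_all_monomials_py max_k (integrate_all_monomials_py max_k)

-- ===== LEMMAS AND PROOFS =====

-- ===== VERDICT (by name: the statement is the Claim_ definition above) =====
-- the per-entry value of B
def pvE (k : Int) : Int := if PySem.Int.mod k 2 == 1 then 0 else oddProdBelow k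

lemma pvMod2 (j : Int) : PySem.Int.mod j 2 = j % 2 := by
  simp [PySem.Int.mod, Int.fmod_eq_emod]

lemma oddProdBelow_step (t : Int) (ht : 0 ≤ t) :
    oddProdBelow (t + 2) = oddProdBelow t *
      (if PySem.Int.mod t 2 == 1 then t else 1) *
      (if PySem.Int.mod (t + 1) 2 == 1 then t + 1 else 1) := by
  rcases eq_or_lt_of_le ht with h0 | h1
  · rw [← h0]; decide
  · unfold oddProdBelow
    rw [show t + 2 = (t + 1) + 1 from by ring,
      PySem.List.pyRange_one_succ_right (by omega : (1:Int) ≤ t + 1),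
      PySem.List.pyRange_one_succ_right (by omega : (1:Int) ≤ t),
      List.foldl_append, List.foldl_append]
    simp only [List.foldl_cons, List.foldl_nil]
    split_ifs <;> ring

lemma pvE_rec (k : Int) (h : 2 ≤ k) : pvE k = pvE (k - 2) * (k - 1) := by
  have hs := oddProdBelow_step (k - 2) (by omega)
  rw [show k - 2 + 2 = k from by ring, show k - 2 + 1 = k - 1 from by ring] at hs
  unfold pvE
  rcases Int.emod_two_eq_zero_or_one k with hk | hk
  · have h2 : (k - 2) % 2 = 0 := by omega
    have h1 : (k - 1) % 2 = 1 := by omega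
    simp only [pvMod2, hk, h2, h1] at hs ⊢
    norm_num at hs ⊢
    rw [hs]
  · have h2 : (k - 2) % 2 = 1 := by omega
    simp only [pvMod2, hk, h2]
    norm_num

lemma fold_eq_map (n : Nat) :
    (PySem.List.pyRange 0 (n : Int) 1).foldl
      (fun out k =>
        if k == 0 then out ++ [1]
        else if k == 1 then out ++ [0]
        else out ++ [PySem.List.pyGetD out (k - 2) 0 * (k - 1)]) []
    = (PySem.List.pyRange 0 (n : Int) 1).map pvE := by
  induction n with
  | zero => rw [PySem.List.pyRange_one_eq_nil (by norm_num)]; rfl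
  | succ n ih =>
    have hcast : ((n + 1 : Nat) : Int) = (n : Int) + 1 := by push_cast; ring
    rw [hcast, PySem.List.pyRange_one_succ_right (by positivity), List.foldl_append,
      List.map_append, ih]
    simp only [List.foldl_cons, List.foldl_nil, List.map_cons, List.map_nil]
    match n with
    | 0 => decide
    | 1 => decide
    | (m + 2) =>
      have hge : (2 : Int) ≤ ((m + 2 : Nat) : Int) := by push_cast; omega
      rw [if_neg (by simp; omega), if_neg (by simp; omega)]
      rw [PySem.List.pyGetD_map_pyRange_of_nonneg pvE _ _ _ (by omega) (by omega)]
      rw [← pvE_rec _ hge]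
theorem integrate_all_monomials_py_spec : Claim_equal_integrate_all_monomials_py := by
  intro max_k _
  unfold Spec_integrate_all_monomials_py integrate_all_monomials_py integrate_all_monomials_py_alt
  rcases le_or_gt (max_k + 1) 0 with h | h
  · rw [PySem.List.pyRange_one_eq_nil h]; rfl
  · have : max_k + 1 = ((max_k + 1).toNat : Int) := by omega
    rw [this, fold_eq_map]; rfl
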